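-- pv_equiv track=rewrite | github.com/xbelou211694/prg_test | analyse_numbers.py | is_even_number
-- ===== SOURCE A (Python) =====
-- def is_even_number(number):
--     is_even = []
--     for i in range(len(number)):
--         if i % 2 == 0:
--             is_even.append(True)
--         else:
--             is_even.append(False)
--     return is_even
-- ===== SOURCE B (Python) =====
-- def is_even_number(number):
--     n = len(number)
--     result = [True, False] * (n // 2)
--     if n % 2:
--         result.append(True)
--     return result
-- ===== Notes on version B (the rewrite author's own statement) =====
-- stated objective: idiomatic
-- what changed: B tiles the two-element pattern [True, False] by the length (list repetition) instead of looping over every index and branching on its parity.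
import Mathlib
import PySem

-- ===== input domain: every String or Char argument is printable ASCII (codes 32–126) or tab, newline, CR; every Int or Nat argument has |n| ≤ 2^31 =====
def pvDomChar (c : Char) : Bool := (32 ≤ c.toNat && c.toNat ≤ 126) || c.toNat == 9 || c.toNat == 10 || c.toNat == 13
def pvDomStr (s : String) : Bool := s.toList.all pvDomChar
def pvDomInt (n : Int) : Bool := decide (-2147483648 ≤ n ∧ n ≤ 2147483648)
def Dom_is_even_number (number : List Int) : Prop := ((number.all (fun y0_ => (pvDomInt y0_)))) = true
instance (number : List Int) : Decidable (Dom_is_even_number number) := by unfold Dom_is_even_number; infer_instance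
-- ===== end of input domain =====

-- B tiles the two-element pattern [true, false] by the length instead of looping over every index and branching on its parity (idiomatic).

-- ===== PORT A =====
def is_even_number (number : List Int) : List Bool :=
  (List.range number.length).foldl
    (fun is_even i => if i % 2 = 0 then is_even ++ [true] else is_even ++ [false]) []

-- ===== PORT B =====
def is_even_number_alt (number : List Int) : List Bool :=
  let n := number.length
  let result := (List.replicate (n / 2) ([true, false])).flatten
  if n % 2 ≠ 0 then result ++ [true] else result

-- ===== PRECONDITION & SPEC =====
def Spec_is_even_number (number : List Int) (out : List Bool) : Prop := out = is_even_number_alt number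
instance (number : List Int) (out : List Bool) : Decidable (Spec_is_even_number number out) := by unfold Spec_is_even_number; infer_instance

-- ===== CLAIM (what is proved, stated in full; the proofs are below) =====
def Claim_equal_is_even_number : Prop := ∀ (number : List Int), Dom_is_even_number number → Spec_is_even_number number (is_even_number number)

-- ===== LEMMAS AND PROOFS =====

-- B's tiled pattern, as a function of the length alone
def pvPat (n : Nat) : List Bool :=
  (List.replicate (n / 2) ([true, false])).flatten ++ (if n % 2 ≠ 0 then [true] else [])

theorem pvPat_succ (n : Nat) :
    pvPat (n + 1) = pvPat n ++ [decide (n % 2 = 0)] := by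
  rcases Nat.even_or_odd n with h | h
  · obtain ⟨k, hk⟩ := h
    subst hk
    simp [pvPat, show (k + k + 1) / 2 = k by omega, show (k + k) / 2 = k by omega,
      show (k + k) % 2 = 0 by omega, show (k + k + 1) % 2 = 1 by omega]
  · obtain ⟨k, hk⟩ := h
    subst hk
    simp [pvPat, show (2 * k + 1 + 1) / 2 = k + 1 by omega,
      show (2 * k + 1) / 2 = k by omega,
      show (2 * k + 1) % 2 = 1 by omega, show (2 * k + 1 + 1) % 2 = 0 by omega,
      List.replicate_succ', List.flatten_append]

theorem pvFold_eq_pat (n : Nat) :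
    (List.range n).foldl
      (fun is_even i => if i % 2 = 0 then is_even ++ [true] else is_even ++ [false]) []
      = pvPat n := by
  induction n with
  | zero => simp [pvPat]
  | succ m ih =>
    rw [List.range_succ, List.foldl_append, ih, pvPat_succ]
    by_cases h : m % 2 = 0 <;> simp [h]

-- ===== VERDICT (by name: the statement is the Claim_ definition above) =====
theorem is_even_number_spec : Claim_equal_is_even_number := by
  intro number _
  unfold Spec_is_even_number is_even_number is_even_number_alt
  rw [pvFold_eq_pat]
  by_cases h : number.length % 2 = 0 <;> simp [pvPat, h]
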